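-- pv_equiv track=rewrite | github.com/karagitliev/masterclass_2019 | algorithm.py | sequence_path
-- ===== SOURCE A (Python) =====
-- STEPS = ((-1, 0), (1, 0), (0, -1), (0, 1))
--
-- def sequence_path(grid, x, y, m, n, key):  # dfs
--     if x < 0 or x >= m or y < 0 or y >= n or grid[x][y] != key:
--         return 0
--     count = 1
--     grid[x][y] = 0
--     for i, j in STEPS:
--         count += sequence_path(grid, x + i, y + j, m, n, key)
--     return count
-- ===== SOURCE B (Python) =====
-- def sequence_path(grid, x, y, m, n, key):
--     # iterative DFS with an explicit stack; same return value and same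
--     # in-place zeroing of the flooded cells as the recursive original
--     count = 0
--     stack = [(x, y)]
--     while stack:
--         cx, cy = stack.pop()
--         if cx < 0 or cx >= m or cy < 0 or cy >= n or grid[cx][cy] != key:
--             continue
--         count += 1
--         grid[cx][cy] = 0
--         stack.append((cx, cy + 1))
--         stack.append((cx, cy - 1))
--         stack.append((cx + 1, cy))
--         stack.append((cx - 1, cy))
--     return count
-- ===== Notes on version B (the rewrite author's own statement) =====
-- stated objective: idiomatic
-- what changed: Replaces the recursive flood fill by an iterative DFS with an explicit stack (guard applied on pop), removing recursion (and Python's recursion-depth limit) while keeping the same visit order, count and in-place grid zeroing.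
-- outside the precondition, e.g. on sequence_path([[1], [2]], 0, 0, 3, 1, 1): A returns 1, B returns 1
import Mathlib
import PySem

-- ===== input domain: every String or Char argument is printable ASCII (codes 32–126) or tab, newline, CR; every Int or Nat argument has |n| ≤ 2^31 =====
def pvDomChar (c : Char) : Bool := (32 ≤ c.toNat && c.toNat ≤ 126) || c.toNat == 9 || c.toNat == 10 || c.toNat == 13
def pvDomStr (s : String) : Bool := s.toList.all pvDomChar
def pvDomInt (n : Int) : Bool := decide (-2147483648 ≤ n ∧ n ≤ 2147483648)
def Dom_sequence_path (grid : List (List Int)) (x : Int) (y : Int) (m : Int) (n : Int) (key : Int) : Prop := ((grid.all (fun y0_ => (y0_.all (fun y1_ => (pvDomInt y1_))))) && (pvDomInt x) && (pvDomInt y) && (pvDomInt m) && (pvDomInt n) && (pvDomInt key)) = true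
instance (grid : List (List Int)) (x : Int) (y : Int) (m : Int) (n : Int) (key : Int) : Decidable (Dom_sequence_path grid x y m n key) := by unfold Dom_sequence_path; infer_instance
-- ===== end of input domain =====

-- B replaces the recursive flood fill by an explicit stack-based iterative DFS (same
-- return value; both Pythons zero the flooded cells of `grid` in place — the mutation
-- is identical, the theorems below are about the return value).

-- ===== PORT A =====
-- shared cell access: grid[cx][cy]; only evaluated after the guard established
-- 0 ≤ cx < m and 0 ≤ cy < n, and Pre_ guarantees the access is then in range,
-- so the out-of-range default 0 is never reached on admitted inputs
def cellGet (g : List (List Int)) (cx cy : Int) : Int :=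
  match PySem.List.pyGet? g cx with
  | some row => (PySem.List.pyGet? row cy).getD 0
  | none => 0

-- grid[cx][cy] = 0; only used with 0 ≤ cx, 0 ≤ cy (guard already passed)
def cellZero (g : List (List Int)) (cx cy : Int) : List (List Int) :=
  g.modify cx.toNat (fun row => row.set cy.toNat 0)

def stepsA : List (Int × Int) := [(-1, 0), (1, 0), (0, -1), (0, 1)]

-- recursive DFS of A; `fuel` is a pure totality device (Python recurses unboundedly,
-- which inside Pre_ cannot happen: fuel = number of cells + 1 is proved sufficient)
def dfsA (fuel : Nat) (g : List (List Int)) (x y m n key : Int) : Int × List (List Int) :=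
  match fuel with
  | 0 => (0, g)
  | f + 1 =>
    if x < 0 ∨ m ≤ x ∨ y < 0 ∨ n ≤ y ∨ cellGet g x y ≠ key then (0, g)
    else
      let g0 := cellZero g x y
      stepsA.foldl (fun acc st =>
        let r := dfsA f acc.2 (x + st.1) (y + st.2) m n key
        (acc.1 + r.1, r.2)) (1, g0)

def sequence_path (grid : List (List Int)) (x : Int) (y : Int) (m : Int) (n : Int) (key : Int) : Int :=
  (dfsA (grid.flatten.length + 1) grid x y m n key).1

-- ===== PORT B =====
-- the Python list used as a stack (append/pop at the end) is the Lean list with its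
-- head as the top: pop = head, the four appends = conses in reverse order
def loopB (fuel : Nat) (g : List (List Int)) (stack : List (Int × Int)) (count : Int) (m n key : Int) : Int :=
  match fuel, stack with
  | _, [] => count
  | 0, _ :: _ => count
  | f + 1, (cx, cy) :: rest =>
    if cx < 0 ∨ m ≤ cx ∨ cy < 0 ∨ n ≤ cy ∨ cellGet g cx cy ≠ key then
      loopB f g rest count m n key
    else
      loopB f (cellZero g cx cy)
        ((cx - 1, cy) :: (cx + 1, cy) :: (cx, cy - 1) :: (cx, cy + 1) :: rest)
        (count + 1) m n key

def sequence_path_alt (grid : List (List Int)) (x : Int) (y : Int) (m : Int) (n : Int) (key : Int) : Int :=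
  loopB (4 * grid.flatten.length + 2) grid [(x, y)] 0 m n key

-- ===== PRECONDITION & SPEC =====
-- Pre_ excludes exactly the inputs where A does not return normally: key = 0 with the
-- start cell equal to key (A recurses unboundedly: RecursionError), and grids smaller
-- than the advertised m×n box, where the flood fill can step onto a missing cell
-- (IndexError); the m×n bound also excludes some inputs on which A happens to return
-- because every missing cell is walled off (see cites).
def Pre_sequence_path (grid : List (List Int)) (x : Int) (y : Int) (m : Int) (n : Int) (key : Int) : Prop :=
  ((x < 0 || m ≤ x || y < 0 || n ≤ y)
   || (0 ≤ x && 0 ≤ y &&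
        (match PySem.List.pyGet? grid x with
         | some row => (match PySem.List.pyGet? row y with
                        | some v => v != key
                        | none => false)
         | none => false))
   || (key != 0 && m ≤ (grid.length : Int) && grid.all (fun row => n ≤ (row.length : Int)))) = true

instance (grid : List (List Int)) (x : Int) (y : Int) (m : Int) (n : Int) (key : Int) : Decidable (Pre_sequence_path grid x y m n key) := by unfold Pre_sequence_path; infer_instance

def pvWitness_sequence_path : List (List Int) × Int × Int × Int × Int × Int :=
  ([[1, 1, 2], [2, 1, 1]], 0, 0, 2, 3, 1)

def Spec_sequence_path (grid : List (List Int)) (x : Int) (y : Int) (m : Int) (n : Int) (key : Int) (out : Int) : Prop := out = sequence_path_alt grid x y m n key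
instance (grid : List (List Int)) (x : Int) (y : Int) (m : Int) (n : Int) (key : Int) (out : Int) : Decidable (Spec_sequence_path grid x y m n key out) := by unfold Spec_sequence_path; infer_instance

-- ===== CLAIM (what is proved, stated in full; the proofs are below) =====
def Claim_equal_sequence_path : Prop := ∀ (grid : List (List Int)) (x : Int) (y : Int) (m : Int) (n : Int) (key : Int), Dom_sequence_path grid x y m n key → Pre_sequence_path grid x y m n key → Spec_sequence_path grid x y m n key (sequence_path grid x y m n key)

-- ===== LEMMAS AND PROOFS =====

-- number of cells still equal to key
def kc (g : List (List Int)) (key : Int) : Nat := (g.map (fun r => r.count key)).sum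

theorem kc_le_flatten (g : List (List Int)) (key : Int) : kc g key ≤ g.flatten.length := by
  induction g with
  | nil => simp [kc]
  | cons r t ih =>
    simp only [kc, List.map_cons, List.sum_cons, List.flatten_cons, List.length_append]
    exact Nat.add_le_add (List.count_le_length) ih

theorem loopB_nil (f : Nat) (g : List (List Int)) (cnt m n key : Int) :
    loopB f g [] cnt m n key = cnt := by
  cases f <;> rfl

theorem count_set_zero (r : List Int) (j : Nat) (key : Int) (hj : j < r.length)
    (hv : r[j] = key) (hk : key ≠ 0) : (r.set j 0).count key + 1 = r.count key := by
  rw [List.count_set hj]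
  simp [hv, Ne.symm hk]
  have : 1 ≤ r.count key := by
    have : key ∈ r := hv ▸ List.getElem_mem hj
    exact List.count_pos_iff.mpr this
  omega

theorem kc_modify (g : List (List Int)) (i j : Nat) (key : Int) (hi : i < g.length)
    (hj : j < g[i].length) (hv : g[i][j] = key) (hk : key ≠ 0) :
    kc (g.modify i (fun row => row.set j 0)) key + 1 = kc g key := by
  induction g generalizing i with
  | nil => simp at hi
  | cons r t ih =>
    cases i with
    | zero =>
      rw [List.modify_zero_cons]
      simp only [kc, List.map_cons, List.sum_cons, List.getElem_cons_zero] at *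
      have := count_set_zero r j key hj hv hk
      omega
    | succ i' =>
      rw [List.modify_succ_cons]
      have hi' : i' < t.length := by simp at hi; omega
      simp only [kc, List.map_cons, List.sum_cons, List.getElem_cons_succ] at hj hv ⊢
      have := ih i' hi' hj hv
      simp only [kc] at this
      omega

-- a passed guard means the cell really exists and holds key
theorem guard_cell (g : List (List Int)) (x y key : Int) (hx : 0 ≤ x) (hy : 0 ≤ y)
    (hc : cellGet g x y = key) (hk : key ≠ 0) :
    ∃ (hi : x.toNat < g.length) (hj : y.toNat < (g[x.toNat]).length),
      g[x.toNat][y.toNat] = key := by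
  unfold cellGet at hc
  cases hg : PySem.List.pyGet? g x with
  | none => simp only [hg] at hc; exact absurd hc.symm hk
  | some row =>
    simp only [hg] at hc
    cases hv : PySem.List.pyGet? row y with
    | none => simp only [hv, Option.getD_none] at hc; exact absurd hc.symm hk
    | some v =>
      simp only [hv, Option.getD_some] at hc
      rw [PySem.List.pyGet?_of_nonneg g hx] at hg
      rw [PySem.List.pyGet?_of_nonneg row hy] at hv
      obtain ⟨hi, hrow⟩ := List.getElem?_eq_some_iff.mp hg
      subst hrow
      obtain ⟨hj, hvv⟩ := List.getElem?_eq_some_iff.mp hv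
      exact ⟨hi, hj, by rw [hvv, hc]⟩

theorem kc_cellZero (g : List (List Int)) (x y key : Int) (hx : 0 ≤ x) (hy : 0 ≤ y)
    (hc : cellGet g x y = key) (hk : key ≠ 0) :
    kc (cellZero g x y) key + 1 = kc g key := by
  obtain ⟨hi, hj, hv⟩ := guard_cell g x y key hx hy hc hk
  exact kc_modify g x.toNat y.toNat key hi hj hv hk

-- one unfolding of dfsA with the four-step fold written out (x + -1 etc. normalised)
theorem dfsA_succ (f : Nat) (g : List (List Int)) (x y m n key : Int) :
    dfsA (f + 1) g x y m n key =
      if x < 0 ∨ m ≤ x ∨ y < 0 ∨ n ≤ y ∨ cellGet g x y ≠ key then (0, g)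
      else
        let g0 := cellZero g x y
        let r1 := dfsA f g0 (x - 1) y m n key
        let r2 := dfsA f r1.2 (x + 1) y m n key
        let r3 := dfsA f r2.2 x (y - 1) m n key
        let r4 := dfsA f r3.2 x (y + 1) m n key
        (1 + r1.1 + r2.1 + r3.1 + r4.1, r4.2) := by
  rw [dfsA]
  split
  · rfl
  · simp only [stepsA, List.foldl]
    rw [show x + -1 = x - 1 by ring, show y + -1 = y - 1 by ring,
        show x + 0 = x by ring, show y + 0 = y by ring]

theorem kc_dfsA_le (f : Nat) (g : List (List Int)) (x y m n key : Int) (hk : key ≠ 0) :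
    kc (dfsA f g x y m n key).2 key ≤ kc g key := by
  induction f generalizing g x y with
  | zero => simp [dfsA]
  | succ f ih =>
    rw [dfsA_succ]
    by_cases hguard : x < 0 ∨ m ≤ x ∨ y < 0 ∨ n ≤ y ∨ cellGet g x y ≠ key
    · rw [if_pos hguard]
    · rw [if_neg hguard]
      push_neg at hguard
      obtain ⟨hx, hmx, hy, hny, hc⟩ := hguard
      simp only []
      have h0 : kc (cellZero g x y) key + 1 = kc g key := kc_cellZero g x y key hx hy hc hk
      calc kc (dfsA f (dfsA f (dfsA f (dfsA f (cellZero g x y) (x - 1) y m n key).2 (x + 1) y m n key).2 x (y - 1) m n key).2 x (y + 1) m n key).2 key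
          ≤ kc (dfsA f (dfsA f (dfsA f (cellZero g x y) (x - 1) y m n key).2 (x + 1) y m n key).2 x (y - 1) m n key).2 key := ih _ _ _
        _ ≤ kc (dfsA f (dfsA f (cellZero g x y) (x - 1) y m n key).2 (x + 1) y m n key).2 key := ih _ _ _
        _ ≤ kc (dfsA f (cellZero g x y) (x - 1) y m n key).2 key := ih _ _ _
        _ ≤ kc (cellZero g x y) key := ih _ _ _
        _ ≤ kc g key := by omega

-- fuel irrelevance for loopB above the 4·kc + |stack| bound
theorem loopB_fuel (m n key : Int) (hk : key ≠ 0) :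
    ∀ M, ∀ (g : List (List Int)) (st : List (Int × Int)),
      4 * kc g key + st.length ≤ M → ∀ cnt f1 f2,
      4 * kc g key + st.length ≤ f1 → 4 * kc g key + st.length ≤ f2 →
      loopB f1 g st cnt m n key = loopB f2 g st cnt m n key := by
  intro M
  induction M with
  | zero =>
    intro g st hb cnt f1 f2 h1 h2
    match st with
    | [] => rw [loopB_nil, loopB_nil]
    | _ :: _ => simp at hb
  | succ M ih =>
    intro g st hb cnt f1 f2 h1 h2
    match st with
    | [] => rw [loopB_nil, loopB_nil]
    | (cx, cy) :: rest =>
      simp only [List.length_cons] at hb h1 h2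
      obtain ⟨f1', rfl⟩ : ∃ f', f1 = f' + 1 := ⟨f1 - 1, by omega⟩
      obtain ⟨f2', rfl⟩ : ∃ f', f2 = f' + 1 := ⟨f2 - 1, by omega⟩
      rw [loopB, loopB]
      by_cases hguard : cx < 0 ∨ m ≤ cx ∨ cy < 0 ∨ n ≤ cy ∨ cellGet g cx cy ≠ key
      · rw [if_pos hguard, if_pos hguard]
        exact ih g rest (by omega) cnt _ _ (by omega) (by omega)
      · rw [if_neg hguard, if_neg hguard]
        push_neg at hguard
        obtain ⟨hx, hmx, hy, hny, hc⟩ := hguard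
        have h0 : kc (cellZero g cx cy) key + 1 = kc g key := kc_cellZero g cx cy key hx hy hc hk
        exact ih (cellZero g cx cy) _ (by first | omega | (simp only [List.length_cons, List.length_nil]; omega)) (cnt + 1) _ _ (by first | omega | (simp only [List.length_cons, List.length_nil]; omega)) (by first | omega | (simp only [List.length_cons, List.length_nil]; omega))

-- the simulation: popping (x,y) and running the loop = running A's dfs on (x,y),
-- then the loop on the rest with the count increased by dfs's count
theorem simB (m n key : Int) (hk : key ≠ 0) :
    ∀ K, ∀ (g : List (List Int)), kc g key ≤ K →
      ∀ x y (rest : List (Int × Int)) cnt fa fb fr,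
      kc g key + 1 ≤ fa →
      4 * kc g key + rest.length + 1 ≤ fb →
      4 * kc (dfsA fa g x y m n key).2 key + rest.length ≤ fr →
      loopB fb g ((x, y) :: rest) cnt m n key =
        loopB fr (dfsA fa g x y m n key).2 rest (cnt + (dfsA fa g x y m n key).1) m n key := by
  intro K
  induction K with
  | zero =>
    intro g hg x y rest cnt fa fb fr ha hb hr
    obtain ⟨fa', rfl⟩ : ∃ f', fa = f' + 1 := ⟨fa - 1, by omega⟩
    obtain ⟨fb', rfl⟩ : ∃ f', fb = f' + 1 := ⟨fb - 1, by omega⟩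
    rw [dfsA_succ] at hr ⊢
    rw [loopB]
    by_cases hguard : x < 0 ∨ m ≤ x ∨ y < 0 ∨ n ≤ y ∨ cellGet g x y ≠ key
    · rw [if_pos hguard] at hr ⊢
      rw [if_pos hguard]
      simp only [add_zero]
      exact loopB_fuel m n key hk (4 * kc g key + rest.length) g rest (by omega) cnt fb' fr (by omega) (by omega)
    · exfalso
      push_neg at hguard
      obtain ⟨hx, hmx, hy, hny, hc⟩ := hguard
      have := kc_cellZero g x y key hx hy hc hk
      omega
  | succ K ih =>
    intro g hg x y rest cnt fa fb fr ha hb hr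
    obtain ⟨fa', rfl⟩ : ∃ f', fa = f' + 1 := ⟨fa - 1, by omega⟩
    obtain ⟨fb', rfl⟩ : ∃ f', fb = f' + 1 := ⟨fb - 1, by omega⟩
    rw [dfsA_succ] at hr ⊢
    rw [loopB]
    by_cases hguard : x < 0 ∨ m ≤ x ∨ y < 0 ∨ n ≤ y ∨ cellGet g x y ≠ key
    · rw [if_pos hguard] at hr ⊢
      rw [if_pos hguard]
      simp only [add_zero]
      exact loopB_fuel m n key hk (4 * kc g key + rest.length) g rest (by omega) cnt fb' fr (by omega) (by omega)
    · rw [if_neg hguard] at hr ⊢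
      rw [if_neg hguard]
      push_neg at hguard
      obtain ⟨hx, hmx, hy, hny, hc⟩ := hguard
      simp only [] at hr ⊢
      have h0 : kc (cellZero g x y) key + 1 = kc g key := kc_cellZero g x y key hx hy hc hk
      set g0 := cellZero g x y with hg0
      have hkg0 : kc g0 key ≤ K := by omega
      set r1 := dfsA fa' g0 (x - 1) y m n key with hr1
      have hkr1 : kc r1.2 key ≤ kc g0 key := kc_dfsA_le _ _ _ _ _ _ _ hk
      set r2 := dfsA fa' r1.2 (x + 1) y m n key with hr2
      have hkr2 : kc r2.2 key ≤ kc r1.2 key := kc_dfsA_le _ _ _ _ _ _ _ hk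
      set r3 := dfsA fa' r2.2 x (y - 1) m n key with hr3
      have hkr3 : kc r3.2 key ≤ kc r2.2 key := kc_dfsA_le _ _ _ _ _ _ _ hk
      set r4 := dfsA fa' r3.2 x (y + 1) m n key with hr4
      have hkr4 : kc r4.2 key ≤ kc r3.2 key := kc_dfsA_le _ _ _ _ _ _ _ hk
      have s1 : loopB fb' g0 ((x - 1, y) :: (x + 1, y) :: (x, y - 1) :: (x, y + 1) :: rest) (cnt + 1) m n key =
          loopB (4 * kc r1.2 key + rest.length + 9) r1.2 ((x + 1, y) :: (x, y - 1) :: (x, y + 1) :: rest) (cnt + 1 + r1.1) m n key := by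
        have := ih g0 hkg0 (x - 1) y ((x + 1, y) :: (x, y - 1) :: (x, y + 1) :: rest) (cnt + 1) fa' fb' (4 * kc r1.2 key + rest.length + 9)
        rw [← hr1] at this
        exact this (by omega) (by first | omega | (simp only [List.length_cons, List.length_nil]; omega)) (by first | omega | (simp only [List.length_cons, List.length_nil]; omega))
      have s2 : loopB (4 * kc r1.2 key + rest.length + 9) r1.2 ((x + 1, y) :: (x, y - 1) :: (x, y + 1) :: rest) (cnt + 1 + r1.1) m n key =
          loopB (4 * kc r2.2 key + rest.length + 6) r2.2 ((x, y - 1) :: (x, y + 1) :: rest) (cnt + 1 + r1.1 + r2.1) m n key := by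
        have := ih r1.2 (by omega) (x + 1) y ((x, y - 1) :: (x, y + 1) :: rest) (cnt + 1 + r1.1) fa' (4 * kc r1.2 key + rest.length + 9) (4 * kc r2.2 key + rest.length + 6)
        rw [← hr2] at this
        exact this (by omega) (by first | omega | (simp only [List.length_cons, List.length_nil]; omega)) (by first | omega | (simp only [List.length_cons, List.length_nil]; omega))
      have s3 : loopB (4 * kc r2.2 key + rest.length + 6) r2.2 ((x, y - 1) :: (x, y + 1) :: rest) (cnt + 1 + r1.1 + r2.1) m n key =
          loopB (4 * kc r3.2 key + rest.length + 3) r3.2 ((x, y + 1) :: rest) (cnt + 1 + r1.1 + r2.1 + r3.1) m n key := by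
        have := ih r2.2 (by omega) x (y - 1) ((x, y + 1) :: rest) (cnt + 1 + r1.1 + r2.1) fa' (4 * kc r2.2 key + rest.length + 6) (4 * kc r3.2 key + rest.length + 3)
        rw [← hr3] at this
        exact this (by omega) (by first | omega | (simp only [List.length_cons, List.length_nil]; omega)) (by first | omega | (simp only [List.length_cons, List.length_nil]; omega))
      have s4 : loopB (4 * kc r3.2 key + rest.length + 3) r3.2 ((x, y + 1) :: rest) (cnt + 1 + r1.1 + r2.1 + r3.1) m n key =
          loopB fr r4.2 rest (cnt + 1 + r1.1 + r2.1 + r3.1 + r4.1) m n key := by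
        have := ih r3.2 (by omega) x (y + 1) rest (cnt + 1 + r1.1 + r2.1 + r3.1) fa' (4 * kc r3.2 key + rest.length + 3) fr
        rw [← hr4] at this
        exact this (by omega) (by first | omega | (simp only [List.length_cons, List.length_nil]; omega)) (by omega)
      rw [s1, s2, s3, s4]
      have hadd : cnt + 1 + r1.1 + r2.1 + r3.1 + r4.1 = cnt + (1 + r1.1 + r2.1 + r3.1 + r4.1) := by omega
      rw [hadd]

-- extracting key ≠ 0 from Pre_ when the start guard passes
theorem pre_key_ne (grid : List (List Int)) (x y m n key : Int)
    (hpre : Pre_sequence_path grid x y m n key)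
    (hx : 0 ≤ x) (hmx : x < m) (hy : 0 ≤ y) (hny : y < n)
    (hc : cellGet grid x y = key) : key ≠ 0 := by
  unfold Pre_sequence_path at hpre
  simp only [Bool.or_eq_true, Bool.and_eq_true, decide_eq_true_eq] at hpre
  rcases hpre with ((hbox | hcell) | hrest)
  · exfalso; omega
  · exfalso
    obtain ⟨⟨hx0, hy0⟩, hmatch⟩ := hcell
    cases hg : PySem.List.pyGet? grid x with
    | none => simp only [hg] at hmatch; exact Bool.noConfusion hmatch
    | some row =>
      simp only [hg] at hmatch
      cases hv : PySem.List.pyGet? row y with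
      | none => simp only [hv] at hmatch; exact Bool.noConfusion hmatch
      | some v =>
        simp only [hv, bne_iff_ne] at hmatch
        have hcv : cellGet grid x y = v := by simp [cellGet, hg, hv]
        exact hmatch (by rw [← hcv, hc])
  · intro h0
    rw [h0] at hrest
    simp at hrest

-- ===== VERDICT (by name: the statement is the Claim_ definition above) =====
theorem sequence_path_spec : Claim_equal_sequence_path := by
  intro grid x y m n key _hdom hpre
  unfold Spec_sequence_path sequence_path sequence_path_alt
  set N := grid.flatten.length with hN
  by_cases hguard : x < 0 ∨ m ≤ x ∨ y < 0 ∨ n ≤ y ∨ cellGet grid x y ≠ key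
  · rw [dfsA_succ, if_pos hguard]
    have h2 : (4 * N + 2) = (4 * N + 1) + 1 := by omega
    rw [h2, loopB, if_pos hguard, loopB_nil]
  · push_neg at hguard
    obtain ⟨hx, hmx, hy, hny, hc⟩ := hguard
    have hk : key ≠ 0 := pre_key_ne grid x y m n key hpre hx hmx hy hny hc
    have hkc : kc grid key ≤ N := kc_le_flatten grid key
    have hfin : kc (dfsA (N + 1) grid x y m n key).2 key ≤ N :=
      le_trans (kc_dfsA_le _ _ _ _ _ _ _ hk) hkc
    have hs := simB m n key hk (kc grid key) grid (le_refl _) x y [] 0 (N + 1) (4 * N + 2) (4 * N)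
      (by omega) (by first | omega | (simp only [List.length_cons, List.length_nil]; omega)) (by first | omega | (simp only [List.length_cons, List.length_nil]; omega))
    rw [hs, loopB_nil]
    omega
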